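-- pv_equiv track=rewrite | github.com/KodCode-AI/kodcode | demo/SFT_KodCode_leetcode_100_1741214688/cross_verification_SFT_KodCode_leetcode_100_1741214688/Leetcode_00000056_C/trial_r1_2/solution.py | max_distinct_elements_in_subarray
-- ===== SOURCE A (Python) =====
-- from typing import List
--
-- def max_distinct_elements_in_subarray(nums: List[int], k: int) -> int:
--     if k == 0 or len(nums) == 0 or k > len(nums):
--         return 0
--
--     max_distinct = 0
--     current_counts = {}
--     distinct = 0
--
--     # Initialize the first window
--     for i in range(k):
--         num = nums[i]
--         if num not in current_counts:
--             distinct += 1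
--         current_counts[num] = current_counts.get(num, 0) + 1
--
--     max_distinct = distinct
--
--     # Slide the window
--     for i in range(1, len(nums) - k + 1):
--         # Remove the leftmost element
--         left = nums[i - 1]
--         current_counts[left] -= 1
--         if current_counts[left] == 0:
--             distinct -= 1
--             del current_counts[left]
--
--         # Add the new rightmost element
--         right = nums[i + k - 1]
--         if right not in current_counts:
--             distinct += 1
--         current_counts[right] = current_counts.get(right, 0) + 1
--
--         # Update the maximum distinct count
--         if distinct > max_distinct:
--             max_distinct = distinct
--
--     return max_distinct
-- ===== SOURCE B (Python) =====
-- def max_distinct_elements_in_subarray(nums, k):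
--     if k == 0 or len(nums) == 0 or k > len(nums):
--         return 0
--     return max(len(set(nums[i:i + k])) for i in range(len(nums) - k + 1))
-- ===== Notes on version B (the rewrite author's own statement) =====
-- stated objective: simpler
-- what changed: Replaces the incremental sliding-window counter dictionary (add right element, remove left element, maintain a distinct count) by a one-line max over windows, building a fresh set per window; Pre_ excludes k < 0 with a nonempty list, where A raises KeyError.
import Mathlib
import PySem

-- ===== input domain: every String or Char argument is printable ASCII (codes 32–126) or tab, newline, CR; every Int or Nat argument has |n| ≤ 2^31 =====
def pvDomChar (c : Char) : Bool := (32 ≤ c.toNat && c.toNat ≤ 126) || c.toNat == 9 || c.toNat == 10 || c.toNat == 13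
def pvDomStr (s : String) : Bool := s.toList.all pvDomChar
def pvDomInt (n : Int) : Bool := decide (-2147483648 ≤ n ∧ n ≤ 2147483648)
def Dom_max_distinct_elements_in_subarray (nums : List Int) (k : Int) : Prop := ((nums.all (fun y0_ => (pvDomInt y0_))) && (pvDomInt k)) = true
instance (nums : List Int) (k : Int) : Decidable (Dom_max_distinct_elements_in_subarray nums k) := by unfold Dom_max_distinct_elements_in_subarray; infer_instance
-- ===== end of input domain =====

-- B replaces A's incremental sliding-window counter by a plain max over per-window fresh sets (simpler, not faster).


-- ===== PORT A =====
-- body of A's first loop ('initialize the first window'); pyGetD totalizes nums[i] (always in range under the guard)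
def pvInitA (nums : List Int) (st : PySem.Dict Int Int × Int) (i : Int) : PySem.Dict Int Int × Int :=
  let num := PySem.List.pyGetD nums i 0
  let distinct := if st.1.contains num then st.2 else st.2 + 1
  (st.1.insert num (st.1.getD num 0 + 1), distinct)

-- body of A's slide loop; state = (current_counts, distinct, max_distinct)
def pvStepA (nums : List Int) (k : Int) (st : PySem.Dict Int Int × Int × Int) (i : Int) : PySem.Dict Int Int × Int × Int :=
  let left := PySem.List.pyGetD nums (i - 1) 0
  let counts := st.1.insert left (st.1.getD left 0 - 1)
  let p : PySem.Dict Int Int × Int :=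
    if counts.getD left 0 = 0 then (counts.erase left, st.2.1 - 1) else (counts, st.2.1)
  let right := PySem.List.pyGetD nums (i + k - 1) 0
  let distinct := if p.1.contains right then p.2 else p.2 + 1
  let counts2 := p.1.insert right (p.1.getD right 0 + 1)
  let maxd := if distinct > st.2.2 then distinct else st.2.2
  (counts2, distinct, maxd)

def max_distinct_elements_in_subarray (nums : List Int) (k : Int) : Int :=
  if k = 0 ∨ nums.length = 0 ∨ k > (nums.length : Int) then 0
  else
    let init := (PySem.List.pyRange 0 k 1).foldl (pvInitA nums) (PySem.Dict.empty, 0)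
    let fin := (PySem.List.pyRange 1 ((nums.length : Int) - k + 1) 1).foldl (pvStepA nums k) (init.1, init.2, init.2)
    fin.2.2

-- ===== PORT B =====
def max_distinct_elements_in_subarray_alt (nums : List Int) (k : Int) : Int :=
  if k = 0 ∨ nums.length = 0 ∨ k > (nums.length : Int) then 0
  else
    -- max(len(set(nums[i:i+k])) for i in range(len(nums)-k+1)); the [] arm is unreachable (the range is
    -- nonempty under the guard, where Python's max would raise)
    match (PySem.List.pyRange 0 ((nums.length : Int) - k + 1) 1).map
        (fun i => ((PySem.Set.ofList (PySem.List.slice nums (some i) (some (i + k)))).length : Int)) with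
    | [] => 0
    | v :: rest => rest.foldl max v

-- ===== PRECONDITION & SPEC =====
-- Pre_ excludes exactly the inputs where A raises: k < 0 with a nonempty list makes A's slide loop hit
-- 'current_counts[left] -= 1' on a key that was never initialized (KeyError).
def Pre_max_distinct_elements_in_subarray (nums : List Int) (k : Int) : Prop := 0 ≤ k ∨ nums = []
instance (nums : List Int) (k : Int) : Decidable (Pre_max_distinct_elements_in_subarray nums k) := by unfold Pre_max_distinct_elements_in_subarray; infer_instance
def pvWitness_max_distinct_elements_in_subarray : List Int × Int := ([1, 2, 2], 2)
def Spec_max_distinct_elements_in_subarray (nums : List Int) (k : Int) (out : Int) : Prop := out = max_distinct_elements_in_subarray_alt nums k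
instance (nums : List Int) (k : Int) (out : Int) : Decidable (Spec_max_distinct_elements_in_subarray nums k out) := by unfold Spec_max_distinct_elements_in_subarray; infer_instance

-- ===== CLAIM (what is proved, stated in full; the proofs are below) =====
def Claim_equal_max_distinct_elements_in_subarray : Prop := ∀ (nums : List Int) (k : Int), Dom_max_distinct_elements_in_subarray nums k → Pre_max_distinct_elements_in_subarray nums k → Spec_max_distinct_elements_in_subarray nums k (max_distinct_elements_in_subarray nums k)

-- ===== LEMMAS AND PROOFS =====

-- the window of length K starting at j
def pvWin (nums : List Int) (K j : Nat) : List Int := (nums.drop j).take K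

-- number of distinct elements of a list, as an Int
def pvDc (l : List Int) : Int := (l.dedup.length : Int)

-- running maximum of g 0, ..., g m
def pvBest (g : Nat → Int) : Nat → Int
  | 0 => g 0
  | j + 1 => max (pvBest g j) (g (j + 1))

-- counter invariant: d holds exactly the elements of l, each with its multiplicity
def pvInv (d : PySem.Dict Int Int) (l : List Int) : Prop :=
  ∀ x : Int, d.get? x = if x ∈ l then some ((l.count x : Int)) else none

theorem pv_setcard (l : List Int) : ((PySem.Set.ofList l).length : Int) = pvDc l := by
  have h : (PySem.Set.ofList l).Perm l.dedup := by
    refine (List.perm_ext_iff_of_nodup (PySem.Set.nodup_ofList _) l.nodup_dedup).2 ?_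
    intro x; simp [PySem.Set.mem_ofList, List.mem_dedup]
  simp [pvDc, h.length_eq]

theorem pv_dc_cons (a : Int) (l : List Int) :
    pvDc (a :: l) = pvDc l + (if a ∈ l then 0 else 1) := by
  by_cases h : a ∈ l
  · simp [pvDc, List.dedup_cons_of_mem h, h]
  · simp [pvDc, List.dedup_cons_of_notMem h, h]

theorem pv_dc_append (l : List Int) (b : Int) :
    pvDc (l ++ [b]) = pvDc l + (if b ∈ l then 0 else 1) := by
  rw [← pv_setcard, ← pv_setcard, PySem.Set.ofList_append_singleton]
  by_cases h : b ∈ l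
  · rw [PySem.Set.add_of_mem (by simpa [PySem.Set.mem_ofList] using h)]; simp [h]
  · rw [PySem.Set.add_of_not_mem (by simpa [PySem.Set.mem_ofList] using h)]; simp [h]

theorem pv_get?_erase (d : PySem.Dict Int Int) (k x : Int) :
    (d.erase k).get? x = if x = k then none else d.get? x := by
  obtain ⟨items⟩ := d
  induction items with
  | nil => simp [PySem.Dict.erase, PySem.Dict.get?]
  | cons p t ih =>
    by_cases hk : p.1 = k <;> by_cases hx : p.1 = x <;>
      simp_all [PySem.Dict.erase, PySem.Dict.get?]

-- shared 'add the new element' phase (A's first loop body and the second half of its slide body)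
theorem pv_add (d : PySem.Dict Int Int) (l : List Int) (dist b : Int)
    (hI : pvInv d l) (hd : dist = pvDc l) :
    pvInv (d.insert b (d.getD b 0 + 1)) (l ++ [b]) ∧
      (if d.contains b then dist else dist + 1) = pvDc (l ++ [b]) := by
  have hget : d.getD b 0 = (l.count b : Int) := by
    rw [PySem.Dict.getD_eq_get?_getD, hI b]
    by_cases h : b ∈ l
    · simp [h]
    · simp [h, List.count_eq_zero_of_not_mem h]
  have hcont : d.contains b = decide (b ∈ l) := by
    rw [PySem.Dict.contains_eq_isSome_get?, hI b]
    by_cases h : b ∈ l <;> simp [h]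
  constructor
  · intro x
    rw [PySem.Dict.get?_insert]
    by_cases hx : x = b
    · subst hx
      simp [hget, List.count_append]
    · have hbx : ¬b = x := fun h => hx h.symm
      rw [if_neg hx, hI x]
      by_cases hm : x ∈ l <;> simp [hm, hx, hbx, List.count_append]
  · rw [pv_dc_append, ← hd, hcont]
    by_cases h : b ∈ l <;> simp [h]

-- A's first loop establishes the counter invariant for the prefix
theorem pv_init (nums : List Int) (m : Nat) (hm : m ≤ nums.length) :
    pvInv (((List.range m).map (fun i : Nat => (i : Int))).foldl (pvInitA nums) (PySem.Dict.empty, 0)).1 (nums.take m) ∧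
      (((List.range m).map (fun i : Nat => (i : Int))).foldl (pvInitA nums) (PySem.Dict.empty, 0)).2 = pvDc (nums.take m) := by
  induction m with
  | zero =>
    refine ⟨fun x => ?_, ?_⟩
    · simp [PySem.Dict.get?_empty]
    · simp [pvDc]
  | succ m ih =>
    have hlt : m < nums.length := hm
    obtain ⟨ih1, ih2⟩ := ih (Nat.le_of_succ_le hm)
    rw [List.range_succ, List.map_append, List.foldl_append]
    have htake : nums.take (m + 1) = nums.take m ++ [nums[m]] := by
      rw [List.take_add_one, List.getElem?_eq_getElem hlt]; rfl
    set st := ((List.range m).map (fun i : Nat => (i : Int))).foldl (pvInitA nums) (PySem.Dict.empty, 0) with hst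
    have hnum : PySem.List.pyGetD nums ((m : Nat) : Int) 0 = nums[m] := by
      simp [List.getD_eq_getElem?_getD, List.getElem?_eq_getElem hlt]
    simp only [List.map_cons, List.map_nil, List.foldl_cons, List.foldl_nil, pvInitA, hnum]
    rw [htake]
    exact pv_add st.1 (nums.take m) st.2 nums[m] ih1 ih2

-- 'remove the leftmost element' phase of A's slide body
theorem pv_remove (d : PySem.Dict Int Int) (a : Int) (mid : List Int) (dist : Int)
    (hI : pvInv d (a :: mid)) (hd : dist = pvDc (a :: mid)) :
    pvInv (if (d.insert a (d.getD a 0 - 1)).getD a 0 = 0 then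
            (d.insert a (d.getD a 0 - 1)).erase a else d.insert a (d.getD a 0 - 1)) mid ∧
      (if (d.insert a (d.getD a 0 - 1)).getD a 0 = 0 then dist - 1 else dist) = pvDc mid := by
  have hIa := hI a
  rw [if_pos List.mem_cons_self] at hIa
  have hgetDa : d.getD a 0 = (mid.count a : Int) + 1 := by
    rw [PySem.Dict.getD_eq_get?_getD, hIa]
    simp [List.count_cons_self]
  have hd1a : (d.insert a (d.getD a 0 - 1)).getD a 0 = (mid.count a : Int) := by
    rw [PySem.Dict.getD_insert_self, hgetDa]; ring
  by_cases hmem : a ∈ mid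
  · have hne : ¬ ((d.insert a (d.getD a 0 - 1)).getD a 0 = 0) := by
      rw [hd1a]
      have := List.count_pos_iff.2 hmem
      omega
    rw [if_neg hne, if_neg hne]
    refine ⟨fun x => ?_, ?_⟩
    · by_cases hx : x = a
      · subst hx
        rw [PySem.Dict.get?_insert_self, hgetDa, if_pos hmem]
        congr 1; ring
      · have hax : ¬a = x := fun h => hx h.symm
        rw [PySem.Dict.get?_insert, if_neg hx, hI x]
        by_cases hm2 : x ∈ mid <;> simp [hm2, hx, hax]
    · rw [hd, pv_dc_cons]; simp [hmem]
  · have heq : (d.insert a (d.getD a 0 - 1)).getD a 0 = 0 := by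
      rw [hd1a]
      have : mid.count a = 0 := List.count_eq_zero.2 hmem
      omega
    rw [if_pos heq, if_pos heq]
    refine ⟨fun x => ?_, ?_⟩
    · rw [pv_get?_erase]
      by_cases hx : x = a
      · subst hx; simp [hmem]
      · have hax : ¬a = x := fun h => hx h.symm
        rw [if_neg hx, PySem.Dict.get?_insert, if_neg hx, hI x]
        by_cases hm2 : x ∈ mid <;> simp [hm2, hx, hax]
    · rw [hd, pv_dc_cons]; simp [hmem]

-- one slide step: counter moves from window m to window m+1, max picks up the new distinct count
theorem pv_step (nums : List Int) (K m : Nat) (hK : 1 ≤ K) (h : m + K < nums.length)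
    (d : PySem.Dict Int Int) (dist maxd : Int)
    (hI : pvInv d (pvWin nums K m)) (hd : dist = pvDc (pvWin nums K m)) :
    pvInv (pvStepA nums (K : Int) (d, dist, maxd) ((m : Int) + 1)).1 (pvWin nums K (m + 1)) ∧
      (pvStepA nums (K : Int) (d, dist, maxd) ((m : Int) + 1)).2.1 = pvDc (pvWin nums K (m + 1)) ∧
      (pvStepA nums (K : Int) (d, dist, maxd) ((m : Int) + 1)).2.2 = max maxd (pvDc (pvWin nums K (m + 1))) := by
  have hm_lt : m < nums.length := by omega
  have hb_lt : m + K < nums.length := h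
  have hdropm : List.drop m nums = nums[m] :: List.drop (m + 1) nums := List.drop_eq_getElem_cons hm_lt
  have hwin_m : pvWin nums K m = nums[m] :: List.take (K - 1) (List.drop (m + 1) nums) := by
    obtain ⟨K', hKK⟩ : ∃ K', K = K' + 1 := ⟨K - 1, by omega⟩
    subst hKK
    show List.take (K' + 1) (List.drop m nums) = _
    rw [hdropm, List.take_succ_cons]
    simp
  have hwin_m1 : pvWin nums K (m + 1) = List.take (K - 1) (List.drop (m + 1) nums) ++ [nums[m + K]] := by
    obtain ⟨K', hKK⟩ : ∃ K', K = K' + 1 := ⟨K - 1, by omega⟩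
    subst hKK
    have hidx : (List.drop (m + 1) nums)[K']? = some nums[m + (K' + 1)] := by
      rw [List.getElem?_drop, show m + 1 + K' = m + (K' + 1) from by omega,
        List.getElem?_eq_getElem (by omega)]
    show List.take (K' + 1) (List.drop (m + 1) nums) = _
    rw [List.take_add_one, hidx]
    simp
  have hleft : PySem.List.pyGetD nums ((m : Int) + 1 - 1) 0 = nums[m] := by
    have he : ((m : Int) + 1 - 1) = ((m : Nat) : Int) := by ring
    rw [he]
    simp [List.getD_eq_getElem?_getD, List.getElem?_eq_getElem hm_lt]
  have hright : PySem.List.pyGetD nums ((m : Int) + 1 + (K : Int) - 1) 0 = nums[m + K] := by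
    have he : ((m : Int) + 1 + (K : Int) - 1) = ((m + K : Nat) : Int) := by omega
    rw [he, PySem.List.pyGetD_natCast, List.getD_eq_getElem?_getD, List.getElem?_eq_getElem hb_lt]
    rfl
  rw [hwin_m] at hI hd
  obtain ⟨hR1, hR2⟩ := pv_remove d nums[m] (List.take (K - 1) (List.drop (m + 1) nums)) dist hI hd
  simp only [pvStepA, hleft, hright]
  simp only [apply_ite (f := fun p : PySem.Dict Int Int × Int => p.1),
             apply_ite (f := fun p : PySem.Dict Int Int × Int => p.2)]
  obtain ⟨hA1, hA2⟩ := pv_add _ _ _ nums[m + K] hR1 hR2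
  rw [hwin_m1]
  refine ⟨hA1, hA2, ?_⟩
  rw [← hA2, max_def]
  split_ifs <;> omega

-- A's slide loop computes the running max of the windows' distinct counts
theorem pv_loop (nums : List Int) (K : Nat) (hK : 1 ≤ K) (hKn : K ≤ nums.length)
    (d0 : PySem.Dict Int Int) (s0 : Int) (hI0 : pvInv d0 (pvWin nums K 0)) (hs0 : s0 = pvDc (pvWin nums K 0)) :
    ∀ m, m ≤ nums.length - K →
      ∃ d, (PySem.List.pyRange 1 ((m : Int) + 1) 1).foldl (pvStepA nums (K : Int)) (d0, s0, s0) =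
            (d, pvDc (pvWin nums K m), pvBest (fun j => pvDc (pvWin nums K j)) m) ∧
          pvInv d (pvWin nums K m) := by
  intro m
  induction m with
  | zero =>
    intro _
    refine ⟨d0, ?_, hI0⟩
    have h0 : (((0 : Nat) : Int) + 1) = 1 := by norm_num
    rw [h0, PySem.List.pyRange_one_eq_nil le_rfl]
    simp [hs0, pvBest]
  | succ m ih =>
    intro hm1
    obtain ⟨d, hfold, hInv⟩ := ih (by omega)
    have hmK : m + K < nums.length := by omega
    have hrange : PySem.List.pyRange 1 (((m + 1 : Nat) : Int) + 1) 1 =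
        PySem.List.pyRange 1 ((m : Int) + 1) 1 ++ [(m : Int) + 1] := by
      have he : (((m + 1 : Nat) : Int) + 1) = ((m : Int) + 1) + 1 := by push_cast; ring
      rw [he, PySem.List.pyRange_one_succ_right (by omega)]
    rw [hrange, List.foldl_append, hfold]
    simp only [List.foldl_cons, List.foldl_nil]
    obtain ⟨s1, s2, s3⟩ := pv_step nums K m hK hmK d (pvDc (pvWin nums K m))
      (pvBest (fun j => pvDc (pvWin nums K j)) m) hInv rfl
    refine ⟨_, ?_, s1⟩
    rw [show pvStepA nums (K : Int) (d, pvDc (pvWin nums K m), pvBest (fun j => pvDc (pvWin nums K j)) m) ((m : Int) + 1) =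
        ((pvStepA nums (K : Int) (d, pvDc (pvWin nums K m), pvBest (fun j => pvDc (pvWin nums K j)) m) ((m : Int) + 1)).1,
         (pvStepA nums (K : Int) (d, pvDc (pvWin nums K m), pvBest (fun j => pvDc (pvWin nums K j)) m) ((m : Int) + 1)).2.1,
         (pvStepA nums (K : Int) (d, pvDc (pvWin nums K m), pvBest (fun j => pvDc (pvWin nums K j)) m) ((m : Int) + 1)).2.2) from rfl,
      s2, s3]
    rfl

-- max() over a nonempty comprehension is the running maximum
theorem pv_bmax (g : Nat → Int) (m : Nat) :
    ∃ v rest, (List.range (m + 1)).map g = v :: rest ∧ rest.foldl max v = pvBest g m := by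
  induction m with
  | zero => exact ⟨g 0, [], by simp, rfl⟩
  | succ m ih =>
    obtain ⟨v, rest, h1, h2⟩ := ih
    refine ⟨v, rest ++ [g (m + 1)], ?_, ?_⟩
    · rw [List.range_succ, List.map_append, h1]; rfl
    · rw [List.foldl_append, h2]; rfl

-- ===== VERDICT (by name: the statement is the Claim_ definition above) =====
theorem max_distinct_elements_in_subarray_spec : Claim_equal_max_distinct_elements_in_subarray := by
  intro nums k hDom hPre
  unfold Spec_max_distinct_elements_in_subarray
  simp only [max_distinct_elements_in_subarray, max_distinct_elements_in_subarray_alt]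
  by_cases hg : k = 0 ∨ nums.length = 0 ∨ k > (nums.length : Int)
  · rw [if_pos hg, if_pos hg]
  · rw [if_neg hg, if_neg hg]
    rw [not_or, not_or, not_lt] at hg
    obtain ⟨hk0, hlen0, hkn⟩ := hg
    have hknn : 0 ≤ k := by
      rcases hPre with h | h
      · exact h
      · exact absurd (by rw [h]; rfl) hlen0
    set n := nums.length with hn
    have hk_eq : k = (k.toNat : Int) := (Int.toNat_of_nonneg hknn).symm
    set K := k.toNat with hKdef
    have hK1 : 1 ≤ K := by omega
    have hKn : K ≤ n := by omega
    rw [hk_eq]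
    -- A's side: initialization plus slide loop
    obtain ⟨hInv0, hs0⟩ := pv_init nums K hKn
    have hbound : ((n : Int) - (K : Int) + 1) = ((n - K : Nat) : Int) + 1 := by omega
    obtain ⟨d, hfold, _⟩ := pv_loop nums K hK1 hKn
      (((List.range K).map (fun i : Nat => (i : Int))).foldl (pvInitA nums) (PySem.Dict.empty, 0)).1
      (((List.range K).map (fun i : Nat => (i : Int))).foldl (pvInitA nums) (PySem.Dict.empty, 0)).2
      hInv0 hs0 (n - K) le_rfl
    rw [PySem.List.pyRange_zero_nat K, hbound, hfold]
    -- B's side: max over the windows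
    have hbound2 : (((n - K : Nat) : Int) + 1) = ((n - K + 1 : Nat) : Int) := by push_cast; ring
    rw [hbound2, PySem.List.pyRange_zero_nat (n - K + 1), List.map_map]
    have hfun : ((fun i => ((PySem.Set.ofList (PySem.List.slice nums (some i) (some (i + (K : Int))))).length : Int)) ∘ (fun i : Nat => (i : Int)))
        = fun j : Nat => pvDc (pvWin nums K j) := by
      funext j
      simp only [Function.comp]
      rw [PySem.List.slice_natCast_add, pv_setcard]
      rfl
    rw [hfun]
    obtain ⟨v, rest, hlist, hfoldB⟩ := pv_bmax (fun j => pvDc (pvWin nums K j)) (n - K)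
    rw [hlist]
    exact hfoldB.symm
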